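-- pv_equiv track=rewrite | github.com/dotradepro/SelenaCore | scripts/migrate_entity_types.py | _classify_by_name
-- ===== SOURCE A (Python) =====
-- PREFIX_MAP: dict[str, str] = {
--     "light":        "light",
--     "switch":       "switch",
--     "outlet":       "outlet",
--     "fan":          "fan",
--     "thermostat":   "thermostat",
--     "sensor":       "sensor",
--     "lock":         "door_lock",
--     "blind":        "curtain",
--     "curtain":      "curtain",
--     "camera":       "camera",
--     "vacuum":       "vacuum",
--     "speaker":      "speaker",
--     "media player": "media_player",
--     "humidifier":   "humidifier",
--     "kettle":       "kettle",
--     "air conditioner": "air_conditioner",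
-- }
--
-- def _classify_by_name(name: str) -> str | None:
--     """Return the canonical entity_type for a name starting with a known
--     prefix (case-insensitive), or None if the name doesn't match any."""
--     if not name:
--         return None
--     lname = name.strip().lower()
--     for prefix, et in PREFIX_MAP.items():
--         if lname.startswith(prefix + " ") or lname == prefix:
--             return et
--         if lname.startswith(prefix + " via ") or lname.startswith(prefix + " "):
--             return et
--     return None
-- ===== SOURCE B (Python) =====
-- PREFIX_MAP: dict[str, str] = {
--     "light":        "light",
--     "switch":       "switch",
--     "outlet":       "outlet",
--     "fan":          "fan",
--     "thermostat":   "thermostat",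
--     "sensor":       "sensor",
--     "lock":         "door_lock",
--     "blind":        "curtain",
--     "curtain":      "curtain",
--     "camera":       "camera",
--     "vacuum":       "vacuum",
--     "speaker":      "speaker",
--     "media player": "media_player",
--     "humidifier":   "humidifier",
--     "kettle":       "kettle",
--     "air conditioner": "air_conditioner",
-- }
--
-- def _classify_by_name(name: str) -> str | None:
--     """Return the canonical entity_type for a name starting with a known
--     prefix (case-insensitive), or None if the name doesn't match any.
--
--     Instead of scanning all PREFIX_MAP entries, scan the name once: every
--     word boundary (each space, plus the end of the string) cuts a candidate
--     prefix, which is looked up directly in the map."""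
--     if not name:
--         return None
--     lname = name.strip().lower()
--     for i, ch in enumerate(lname):
--         if ch == ' ':
--             et = PREFIX_MAP.get(lname[:i])
--             if et is not None:
--                 return et
--     return PREFIX_MAP.get(lname)
-- ===== Notes on version B (the rewrite author's own statement) =====
-- stated objective: idiomatic
-- what changed: Instead of scanning all 16 PREFIX_MAP entries and testing each as a word-boundary prefix of the name, B scans the normalized name once and, at each word boundary (every space, plus the full string), does a direct PREFIX_MAP.get lookup of the candidate prefix cut there.
import Mathlib
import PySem

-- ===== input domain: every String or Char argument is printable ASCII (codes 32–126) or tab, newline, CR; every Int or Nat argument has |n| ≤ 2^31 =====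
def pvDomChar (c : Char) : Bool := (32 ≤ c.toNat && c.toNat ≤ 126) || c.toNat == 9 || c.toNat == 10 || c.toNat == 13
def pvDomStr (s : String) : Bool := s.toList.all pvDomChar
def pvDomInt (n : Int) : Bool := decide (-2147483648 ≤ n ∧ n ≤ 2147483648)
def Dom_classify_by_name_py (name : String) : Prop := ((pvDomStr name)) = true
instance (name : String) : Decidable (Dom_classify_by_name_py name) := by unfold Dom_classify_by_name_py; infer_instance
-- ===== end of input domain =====

-- B replaces A's scan over all 16 PREFIX_MAP entries by a single left-to-right scan of the
-- normalized name that looks each word-boundary cut up directly in the map (idiomatic; same cost class).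

-- ===== PORT A =====
-- A iterates PREFIX_MAP.items(): that items list, in the dict's insertion order, keys as
-- char lists (string functions are defined on List Char in PySem.Chars).
def aItems : List (List Char × String) :=
  [(['l', 'i', 'g', 'h', 't'], "light"),
   (['s', 'w', 'i', 't', 'c', 'h'], "switch"),
   (['o', 'u', 't', 'l', 'e', 't'], "outlet"),
   (['f', 'a', 'n'], "fan"),
   (['t', 'h', 'e', 'r', 'm', 'o', 's', 't', 'a', 't'], "thermostat"),
   (['s', 'e', 'n', 's', 'o', 'r'], "sensor"),
   (['l', 'o', 'c', 'k'], "door_lock"),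
   (['b', 'l', 'i', 'n', 'd'], "curtain"),
   (['c', 'u', 'r', 't', 'a', 'i', 'n'], "curtain"),
   (['c', 'a', 'm', 'e', 'r', 'a'], "camera"),
   (['v', 'a', 'c', 'u', 'u', 'm'], "vacuum"),
   (['s', 'p', 'e', 'a', 'k', 'e', 'r'], "speaker"),
   (['m', 'e', 'd', 'i', 'a', ' ', 'p', 'l', 'a', 'y', 'e', 'r'], "media_player"),
   (['h', 'u', 'm', 'i', 'd', 'i', 'f', 'i', 'e', 'r'], "humidifier"),
   (['k', 'e', 't', 't', 'l', 'e'], "kettle"),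
   (['a', 'i', 'r', ' ', 'c', 'o', 'n', 'd', 'i', 't', 'i', 'o', 'n', 'e', 'r'], "air_conditioner")]

-- the 'for prefix, et in PREFIX_MAP.items()' loop, branch for branch
def aLoop (lname : List Char) : List (List Char × String) → Option String
  | [] => none
  | (p, et) :: rest =>
    if PySem.Chars.startswith lname (p ++ [' ']) || lname == p then some et
    else if PySem.Chars.startswith lname (p ++ [' ', 'v', 'i', 'a', ' ']) || PySem.Chars.startswith lname (p ++ [' ']) then some et
    else aLoop lname rest

def classify_by_name_py (name : String) : Option String :=
  if name.toList = [] then none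
  else aLoop (PySem.Chars.lower (PySem.Chars.strip name.toList)) aItems

-- ===== PORT B =====
-- PREFIX_MAP for Source B's .get lookups, under the dict convention: an association list in
-- insertion order, looked up by first match.
def bMap : List (String × String) :=
  [("light", "light"), ("switch", "switch"), ("outlet", "outlet"), ("fan", "fan"),
   ("thermostat", "thermostat"), ("sensor", "sensor"), ("lock", "door_lock"),
   ("blind", "curtain"), ("curtain", "curtain"), ("camera", "camera"),
   ("vacuum", "vacuum"), ("speaker", "speaker"), ("media player", "media_player"),
   ("humidifier", "humidifier"), ("kettle", "kettle"), ("air conditioner", "air_conditioner")]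

-- PREFIX_MAP.get(q): first matching key's value, none if absent
def bGet (q : List Char) : Option String :=
  (bMap.find? (fun kv => q == kv.1.toList)).map (·.2)

-- Source B's 'for i, ch in enumerate(lname)' scan; pref accumulates the chars already passed
-- in reverse, so pref.reverse is Source B's lname[:i] at the current position.
def bScan (pref : List Char) : List Char → Option String
  | [] => bGet pref.reverse
  | c :: rest =>
    if c = ' ' then
      match bGet pref.reverse with
      | some et => some et
      | none => bScan (c :: pref) rest
    else bScan (c :: pref) rest

def classify_by_name_py_alt (name : String) : Option String :=
  if name.toList = [] then none
  else bScan [] (PySem.Chars.lower (PySem.Chars.strip name.toList))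

-- ===== PRECONDITION & SPEC =====
def Spec_classify_by_name_py (name : String) (out : Option String) : Prop := out = classify_by_name_py_alt name
instance (name : String) (out : Option String) : Decidable (Spec_classify_by_name_py name out) := by unfold Spec_classify_by_name_py; infer_instance

-- ===== CLAIM (what is proved, stated in full; the proofs are below) =====
def Claim_equal_classify_by_name_py : Prop := ∀ (name : String), Dom_classify_by_name_py name → Spec_classify_by_name_py name (classify_by_name_py name)

-- ===== LEMMAS AND PROOFS =====

-- the word-boundary condition under which A's loop accepts key q
def pvCand (L q : List Char) : Prop := (q ++ [' ']) <+: L ∨ L = q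

-- A's per-entry test as a Bool
def pvMatch (L p : List Char) : Bool := PySem.Chars.startswith L (p ++ [' ']) || L == p

-- the list of candidate cuts B's scan looks up, in scan order
def pvCuts (pref : List Char) : List Char → List (List Char)
  | [] => [pref.reverse]
  | c :: rest => if c = ' ' then pref.reverse :: pvCuts (c :: pref) rest else pvCuts (c :: pref) rest

lemma pvMatch_iff (L p : List Char) : pvMatch L p = true ↔ pvCand L p := by
  simp [pvMatch, pvCand, PySem.Chars.startswith_iff]

-- bGet agrees with A's items list entry by entry (the keys are distinct)
set_option maxRecDepth 40000 in
lemma bGet_of_mem : ∀ pe ∈ aItems, bGet pe.1 = some pe.2 := by decide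

set_option maxRecDepth 40000 in
lemma bMap_sub : ∀ kv ∈ bMap, (kv.1.toList, kv.2) ∈ aItems := by decide

lemma mem_of_bGet {q : List Char} {v : String} (h : bGet q = some v) : (q, v) ∈ aItems := by
  unfold bGet at h
  cases hf : bMap.find? (fun kv => q == kv.1.toList) with
  | none => rw [hf] at h; simp at h
  | some kv =>
    rw [hf] at h
    have hkv := List.mem_of_find?_eq_some hf
    have hp := List.find?_some hf
    have hq : q = kv.1.toList := by simpa using hp
    have hv : v = kv.2 := by simpa using h.symm
    subst hq; subst hv
    exact bMap_sub kv hkv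

-- no PREFIX_MAP key extends another key past a word boundary
set_option maxRecDepth 40000 in
lemma table_nopref : ∀ p ∈ aItems, ∀ q ∈ aItems, ¬ (p.1 ++ [' '] <+: q.1) := by decide

lemma prefix_of_prefix_snoc {x q L : List Char} {d : Char} (hx : x <+: L)
    (hq : q ++ [d] <+: L) (hl : x.length ≤ q.length) : x <+: q := by
  have h1 : x <+: q ++ [d] := List.prefix_of_prefix_length_le hx hq (by simp; omega)
  exact List.prefix_of_prefix_length_le h1 (List.prefix_append q [d]) hl

lemma eq_of_prefix_of_length_eq {p q L : List Char} (hp : p <+: L) (hq : q <+: L)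
    (h : p.length = q.length) : p = q :=
  (List.prefix_of_prefix_length_le hp hq h.le).eq_of_length h

lemma pvUniq {L p q : List Char} {v w : String} (hp : (p, v) ∈ aItems)
    (hq : (q, w) ∈ aItems) (h1 : pvCand L p) (h2 : pvCand L q) : p = q := by
  have key : ∀ a b : List Char, ∀ va wb : String, (a, va) ∈ aItems → (b, wb) ∈ aItems →
      pvCand L a → pvCand L b → a.length ≤ b.length → a = b := by
    intro a b va wb ha hb c1 c2 hl
    rcases Nat.lt_or_ge a.length b.length with hlt | hge
    · exfalso
      rcases c2 with hc2 | hc2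
      · rcases c1 with hc1 | hc1
        · exact table_nopref (a, va) ha (b, wb) hb
            (prefix_of_prefix_snoc hc1 hc2 (by simp; omega))
        · have hx := hc2.length_le
          have hy := congrArg List.length hc1
          simp at hx hy
          omega
      · rcases c1 with hc1 | hc1
        · exact table_nopref (a, va) ha (b, wb) hb (hc2 ▸ hc1)
        · have hy := congrArg List.length (hc1.symm.trans hc2)
          simp at hy
          omega
    · have hpa : a <+: L := by
        rcases c1 with hc1 | hc1
        · exact (List.prefix_append a [' ']).trans hc1
        · exact hc1 ▸ List.prefix_refl L
      have hpb : b <+: L := by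
        rcases c2 with hc2 | hc2
        · exact (List.prefix_append b [' ']).trans hc2
        · exact hc2 ▸ List.prefix_refl L
      exact eq_of_prefix_of_length_eq hpa hpb (by omega)
  rcases Nat.le_total p.length q.length with h | h
  · exact key p q v w hp hq h1 h2 h
  · exact (key q p w v hq hp h2 h1 h).symm

lemma aLoop_eq (L : List Char) : ∀ m, aLoop L m = (m.find? (fun pe => pvMatch L pe.1)).map (·.2) := by
  intro m
  induction m with
  | nil => rfl
  | cons pe rest ih =>
    obtain ⟨p, et⟩ := pe
    by_cases h1 : PySem.Chars.startswith L (p ++ [' ']) = true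
    · have hm : pvMatch L p = true := by simp [pvMatch, h1]
      simp [aLoop, h1, hm]
    · rw [Bool.not_eq_true] at h1
      by_cases h2 : (L == p) = true
      · have hm : pvMatch L p = true := by simp [pvMatch, h2]
        simp [aLoop, h2, hm]
      · rw [Bool.not_eq_true] at h2
        have hm : pvMatch L p = false := by simp [pvMatch, h1, h2]
        have h3 : PySem.Chars.startswith L (p ++ [' ', 'v', 'i', 'a', ' ']) = false := by
          rw [← Bool.not_eq_true, PySem.Chars.startswith_iff]
          intro hpre
          have hsub : p ++ [' '] <+: p ++ [' ', 'v', 'i', 'a', ' '] := ⟨['v', 'i', 'a', ' '], by simp⟩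
          have := (PySem.Chars.startswith_iff L (p ++ [' '])).2 (hsub.trans hpre)
          rw [h1] at this
          exact Bool.noConfusion this
        simp [aLoop, h1, h2, h3, hm, ih]

lemma bScan_eq : ∀ (rest pref : List Char),
    bScan pref rest = (pvCuts pref rest).findSome? (fun q => bGet q) := by
  intro rest
  induction rest with
  | nil => intro pref; simp [bScan, pvCuts]
  | cons c r ih =>
    intro pref
    by_cases h : c = ' '
    · subst h
      rw [show pvCuts pref (' ' :: r) = pref.reverse :: pvCuts (' ' :: pref) r from by
        simp [pvCuts]]
      rw [List.findSome?_cons]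
      cases hg : bGet pref.reverse <;> simp [bScan, hg, ih]
    · rw [show pvCuts pref (c :: r) = pvCuts (c :: pref) r from by simp [pvCuts, h]]
      simp only [bScan, if_neg h, ih]

lemma mem_pvCuts : ∀ (rest pref q : List Char),
    q ∈ pvCuts pref rest ↔
      ((q ++ [' ']) <+: (pref.reverse ++ rest) ∨ q = pref.reverse ++ rest) ∧ pref.reverse <+: q := by
  intro rest
  induction rest with
  | nil =>
    intro pref q
    simp only [pvCuts, List.append_nil, List.mem_singleton]
    constructor
    · rintro rfl
      exact ⟨Or.inr rfl, List.prefix_refl _⟩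
    · rintro ⟨h1 | h1, h2⟩
      · have ha := h1.length_le
        have hb := h2.length_le
        simp at ha hb
        omega
      · exact h1
  | cons c r ih =>
    intro pref q
    have ihs := ih (c :: pref) q
    simp only [List.reverse_cons, List.append_assoc, List.singleton_append] at ihs
    by_cases hc : c = ' '
    · subst hc
      rw [show pvCuts pref (' ' :: r) = pref.reverse :: pvCuts (' ' :: pref) r from by
        simp [pvCuts]]
      rw [List.mem_cons, ihs]
      constructor
      · rintro (rfl | ⟨hx1, hx2⟩)
        · exact ⟨Or.inl ⟨r, by simp⟩, List.prefix_refl _⟩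
        · exact ⟨hx1, (List.prefix_append _ [' ']).trans hx2⟩
      · rintro ⟨h1, h2⟩
        by_cases hq : q = pref.reverse
        · exact Or.inl hq
        · refine Or.inr ⟨h1, ?_⟩
          have hlt : pref.reverse.length < q.length := by
            have hx := h2.length_le
            rcases Nat.lt_or_ge pref.reverse.length q.length with hy | hy
            · exact hy
            · exact absurd (eq_of_prefix_of_length_eq h2 (List.prefix_refl q) (by omega)).symm hq
          rcases h1 with h1 | h1
          · exact prefix_of_prefix_snoc
              (show pref.reverse ++ [' '] <+: pref.reverse ++ ' ' :: r from ⟨r, by simp⟩)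
              h1 (by simp at hlt ⊢; omega)
          · exact h1 ▸ ⟨r, by simp⟩
    · rw [show pvCuts pref (c :: r) = pvCuts (c :: pref) r from by simp [pvCuts, hc]]
      rw [ihs]
      constructor
      · rintro ⟨h1, h2⟩
        exact ⟨h1, (List.prefix_append _ [c]).trans h2⟩
      · rintro ⟨h1, h2⟩
        refine ⟨h1, ?_⟩
        have hq : q ≠ pref.reverse := by
          intro hqe
          rcases h1 with h1 | h1
          · rw [hqe] at h1
            have hcc : pref.reverse ++ [c] <+: pref.reverse ++ c :: r := ⟨r, by simp⟩
            have hee := eq_of_prefix_of_length_eq h1 hcc (by simp)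
            simp at hee
            exact hc hee.symm
          · rw [hqe] at h1
            have := congrArg List.length h1
            simp at this
        have hlt : pref.reverse.length < q.length := by
          have hx := h2.length_le
          rcases Nat.lt_or_ge pref.reverse.length q.length with hy | hy
          · exact hy
          · exact absurd (eq_of_prefix_of_length_eq h2 (List.prefix_refl q) (by omega)).symm hq
        rcases h1 with h1 | h1
        · exact prefix_of_prefix_snoc
            (show pref.reverse ++ [c] <+: pref.reverse ++ c :: r from ⟨r, by simp⟩)
            h1 (by simp at hlt ⊢; omega)
        · exact h1 ▸ ⟨r, by simp⟩

lemma mem_pvCuts_nil (L q : List Char) : q ∈ pvCuts [] L ↔ pvCand L q := by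
  rw [mem_pvCuts]
  simp [pvCand, eq_comm]

lemma pvMain (L : List Char) : aLoop L aItems = bScan [] L := by
  rw [aLoop_eq, bScan_eq]
  cases h : (pvCuts [] L).findSome? (fun q => bGet q) with
  | none =>
    have hnone : ∀ q ∈ pvCuts [] L, bGet q = none :=
      List.findSome?_eq_none_iff.1 h
    have hfind : aItems.find? (fun pe => pvMatch L pe.1) = none := by
      rw [List.find?_eq_none]
      rintro ⟨p, v⟩ hmem hmatch
      have hcand : pvCand L p := (pvMatch_iff L p).1 hmatch
      have hcut : p ∈ pvCuts [] L := (mem_pvCuts_nil L p).2 hcand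
      have hz := hnone p hcut
      rw [bGet_of_mem (p, v) hmem] at hz
      simp at hz
    simp [hfind]
  | some v =>
    obtain ⟨q, hqmem, hqget⟩ := List.exists_of_findSome?_eq_some h
    have hqtab : (q, v) ∈ aItems := mem_of_bGet hqget
    have hqc : pvCand L q := (mem_pvCuts_nil L q).1 hqmem
    cases hf : aItems.find? (fun pe => pvMatch L pe.1) with
    | none =>
      exact absurd ((pvMatch_iff L q).2 hqc) (List.find?_eq_none.1 hf (q, v) hqtab)
    | some pe =>
      have hmem := List.mem_of_find?_eq_some hf
      have hmat := List.find?_some hf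
      obtain ⟨p, w⟩ := pe
      have hc : pvCand L p := (pvMatch_iff L p).1 hmat
      have heq : p = q := pvUniq hmem hqtab hc hqc
      subst heq
      have hg := bGet_of_mem (p, w) hmem
      rw [hqget] at hg
      simp only [Option.some.injEq] at hg
      simp [hg]

-- ===== VERDICT (by name: the statement is the Claim_ definition above) =====
theorem classify_by_name_py_spec : Claim_equal_classify_by_name_py := by
  intro name _
  unfold Spec_classify_by_name_py classify_by_name_py classify_by_name_py_alt
  by_cases h : name.toList = []
  · simp [h]
  · simp only [if_neg h]
    exact pvMain _
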